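-- pv_equiv track=rewrite | github.com/Pshah2023/english | src/english.py | numericAnalysis
-- ===== SOURCE A (Python) =====
-- def numericAnalysis(words):
--     organizedList = [[], [], []]
--     for each in words:
--         if isinstance(each, str):
--             if "0" in each:
--                 organizedList[0].append(each)
--             if "1" in each:
--                 organizedList[1].append(each)
--             if "2" in each:
--                 organizedList[2].append(each)
--     organizedList = [li for li in organizedList if len(li) != 0]
--     return organizedList
-- ===== SOURCE B (Python) =====
-- def numericAnalysis(words):
--     buckets = [[w for w in words if isinstance(w, str) and d in w]
--                for d in ("0", "1", "2")]
--     return [b for b in buckets if b]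
-- ===== Notes on version B (the rewrite author's own statement) =====
-- stated objective: simpler
-- what changed: B replaces A's single pass maintaining three mutable bucket lists with three independent filtering scans of words, one per digit, built as a comprehension over the digits.
import Mathlib
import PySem

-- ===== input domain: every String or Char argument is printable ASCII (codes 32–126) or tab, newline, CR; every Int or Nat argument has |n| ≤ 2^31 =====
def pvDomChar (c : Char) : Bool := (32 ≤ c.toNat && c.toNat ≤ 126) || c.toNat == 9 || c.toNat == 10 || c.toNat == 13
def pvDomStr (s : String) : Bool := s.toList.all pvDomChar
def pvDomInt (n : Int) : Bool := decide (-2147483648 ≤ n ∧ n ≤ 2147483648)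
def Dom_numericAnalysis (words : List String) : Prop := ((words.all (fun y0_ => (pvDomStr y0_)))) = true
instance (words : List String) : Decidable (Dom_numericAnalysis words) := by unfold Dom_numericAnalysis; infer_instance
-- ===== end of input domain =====

-- B buckets by three independent per-digit filtering scans instead of A's single pass with three mutable bucket lists (objective: simpler).


-- ===== PORT A =====
-- single pass over words: three accumulated bucket lists (the isinstance(each, str)
-- guard is always true under the List String signature), then drop empty buckets
def numericAnalysis (words : List String) : List (List String) :=
  let st := words.foldl
    (fun (st : List String × List String × List String) each =>
      let st := if PySem.Str.isIn "0" each then (st.1 ++ [each], st.2.1, st.2.2) else st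
      let st := if PySem.Str.isIn "1" each then (st.1, st.2.1 ++ [each], st.2.2) else st
      if PySem.Str.isIn "2" each then (st.1, st.2.1, st.2.2 ++ [each]) else st)
    ([], [], [])
  ([st.1, st.2.1, st.2.2].filter (fun li => li.length ≠ 0))

-- ===== PORT B =====
def numericAnalysis_alt (words : List String) : List (List String) :=
  let buckets := ["0", "1", "2"].map (fun d => words.filter (fun w => PySem.Str.isIn d w))
  buckets.filter (fun b => b ≠ [])

-- ===== PRECONDITION & SPEC =====
def Spec_numericAnalysis (words : List String) (out : List (List String)) : Prop := out = numericAnalysis_alt words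
instance (words : List String) (out : List (List String)) : Decidable (Spec_numericAnalysis words out) := by unfold Spec_numericAnalysis; infer_instance

-- ===== CLAIM (what is proved, stated in full; the proofs are below) =====
def Claim_equal_numericAnalysis : Prop := ∀ (words : List String), Dom_numericAnalysis words → Spec_numericAnalysis words (numericAnalysis words)

-- ===== LEMMAS AND PROOFS =====

-- A's fold carries the three filters of the remaining words, appended to the accumulators
theorem numericAnalysis_fold_eq (words a b c : List String) :
    words.foldl
      (fun (st : List String × List String × List String) each =>
        let st := if PySem.Str.isIn "0" each then (st.1 ++ [each], st.2.1, st.2.2) else st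
        let st := if PySem.Str.isIn "1" each then (st.1, st.2.1 ++ [each], st.2.2) else st
        if PySem.Str.isIn "2" each then (st.1, st.2.1, st.2.2 ++ [each]) else st)
      (a, b, c)
    = (a ++ words.filter (fun w => PySem.Str.isIn "0" w),
       b ++ words.filter (fun w => PySem.Str.isIn "1" w),
       c ++ words.filter (fun w => PySem.Str.isIn "2" w)) := by
  induction words generalizing a b c with
  | nil => simp
  | cons w ws ih =>
    simp only [List.foldl_cons, List.filter_cons]
    split_ifs <;> rw [ih] <;> simp [*]

theorem numericAnalysis_spec : Claim_equal_numericAnalysis := by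
  intro words _
  show numericAnalysis words = numericAnalysis_alt words
  unfold numericAnalysis numericAnalysis_alt
  simp only [numericAnalysis_fold_eq words [] [] [], List.nil_append, List.map, List.filter]
  simp [List.length_eq_zero_iff, ne_eq]
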